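-- pv_equiv track=rewrite | github.com/Lj-github/pythonTool | easyGameTool/foreignTools/lan/german/getAllChileseFromChineseDATASVN.py | meshSame
-- ===== SOURCE A (Python) =====
-- def meshSame(allList):
--     resoultList = []
--     for i in range(len(allList)) :
--         item = allList[i]
--         isContain = False
--         for j in range(len(resoultList)):
--             reItem = resoultList[j]
--             if reItem[1] == item[1]:
--                 isContain = True
--                 resoultList[j][0] = resoultList[j][0]  + "&" + item[0]
--         if not isContain:
--             resoultList.append(item)
--     return resoultList
-- ===== SOURCE B (Python) =====
-- def meshSame(allList):
--     groups = {}
--     for item in allList: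
--         groups.setdefault(item[1], []).append(item)
--     return [["&".join(it[0] for it in items)] + items[0][1:]
--             for items in groups.values()]
-- ===== Notes on version B (the rewrite author's own statement) =====
-- stated objective: alternative
-- what changed: Instead of incrementally merging each element into a growing result via an inner scan, B first groups all items by their second field in one pass and then builds each output row once, joining all first fields with '&'.join; B also does not mutate the caller's inner lists (equivalence is about the return value).
-- outside the precondition, e.g. on meshSame([[]]): A returns [[]], B raises IndexError
import Mathlib
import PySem

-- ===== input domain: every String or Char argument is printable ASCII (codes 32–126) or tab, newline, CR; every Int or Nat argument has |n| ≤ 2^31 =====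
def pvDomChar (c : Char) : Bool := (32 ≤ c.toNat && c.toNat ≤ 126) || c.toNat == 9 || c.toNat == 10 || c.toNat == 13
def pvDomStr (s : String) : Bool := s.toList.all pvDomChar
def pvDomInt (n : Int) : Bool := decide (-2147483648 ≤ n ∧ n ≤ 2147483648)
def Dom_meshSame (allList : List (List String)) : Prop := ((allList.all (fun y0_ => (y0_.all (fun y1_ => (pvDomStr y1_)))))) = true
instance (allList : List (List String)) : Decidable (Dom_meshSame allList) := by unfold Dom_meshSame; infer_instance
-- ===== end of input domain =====

-- B replaces A's incremental merge (inner scan of the growing result) by a staged group-by: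
-- one pass groups the items by their second field, then each output row is built once by
-- joining all collected first fields with "&".
-- Python A mutates the input's inner lists in place, B does not: the equivalence proved is about the RETURN value only.

-- ===== PORT A =====
-- inner loop 'for j in range(len(resoultList))': state (isContain, rebuilt list);
-- reItem[1]/item[0] are in range on Pre_; out of range pyGetD supplies "" (Python raises there, excluded by Pre_)
def meshSameInner (item : List String) (acc : Bool × List (List String)) (reItem : List String) :
    Bool × List (List String) :=
  if PySem.List.pyGetD reItem 1 "" = PySem.List.pyGetD item 1 "" then
    (true, acc.2 ++ [reItem.set 0 (PySem.List.pyGetD reItem 0 "" ++ "&" ++ PySem.List.pyGetD item 0 "")])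
  else
    (acc.1, acc.2 ++ [reItem])

def meshSameStep (resoultList : List (List String)) (item : List String) : List (List String) :=
  let p := resoultList.foldl (meshSameInner item) (false, [])
  if p.1 then p.2 else p.2 ++ [item]

def meshSame (allList : List (List String)) : List (List String) :=
  allList.foldl meshSameStep []

-- ===== PORT B =====
-- 'groups.setdefault(item[1], []).append(item)' = groups[item[1]] = groups.get(item[1], []) + [item]
def meshSame_altGroup (d : PySem.Dict String (List (List String))) (item : List String) :
    PySem.Dict String (List (List String)) :=
  d.modify (PySem.List.pyGetD item 1 "") [] (· ++ [item])

-- '["&".join(it[0] for it in items)] + items[0][1:]'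
def meshSame_altRow (items : List (List String)) : List String :=
  [PySem.Str.join "&" (items.map (fun it => PySem.List.pyGetD it 0 ""))] ++
    PySem.List.slice (PySem.List.pyGetD items 0 []) (some 1) none

def meshSame_alt (allList : List (List String)) : List (List String) :=
  ((allList.foldl meshSame_altGroup PySem.Dict.empty).values).map meshSame_altRow

-- ===== PRECONDITION & SPEC =====
-- Pre_ excludes inputs containing an item with fewer than 2 fields: on those the Python A raises
-- IndexError except in the degenerate single-item case, where its returned value is an accident of
-- the empty inner loop and B raises.
def Pre_meshSame (allList : List (List String)) : Prop :=
  ∀ x ∈ allList, 2 ≤ x.length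
instance (allList : List (List String)) : Decidable (Pre_meshSame allList) := by
  unfold Pre_meshSame; infer_instance

def pvWitness_meshSame : List (List String) := [["a", "x"], ["b", "x"], ["c", "y"]]

def Spec_meshSame (allList : List (List String)) (out : List (List String)) : Prop := out = meshSame_alt allList
instance (allList : List (List String)) (out : List (List String)) : Decidable (Spec_meshSame allList out) := by unfold Spec_meshSame; infer_instance

-- ===== CLAIM (what is proved, stated in full; the proofs are below) =====
def Claim_equal_meshSame : Prop := ∀ (allList : List (List String)), Dom_meshSame allList → Pre_meshSame allList → Spec_meshSame allList (meshSame allList)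

-- ===== LEMMAS AND PROOFS =====

-- the key field item[1] as a function
def msKey (r : List String) : String := PySem.List.pyGetD r 1 ""

-- the per-match update A applies to a stored entry
def msUpd (item r : List String) : List String :=
  r.set 0 (PySem.List.pyGetD r 0 "" ++ "&" ++ PySem.List.pyGetD item 0 "")

-- characterisation of A's inner loop
lemma meshSameInner_foldl (item : List String) (res : List (List String))
    (b : Bool) (acc : List (List String)) :
    res.foldl (meshSameInner item) (b, acc) =
      (b || res.any (fun r => msKey r = msKey item),
       acc ++ res.map (fun r => if msKey r = msKey item then msUpd item r else r)) := by
  induction res generalizing b acc with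
  | nil => simp
  | cons r t ih =>
    simp only [msKey, msUpd] at ih ⊢
    by_cases h : PySem.List.pyGetD r 1 "" = PySem.List.pyGetD item 1 ""
    · simp [meshSameInner, h, ih, List.append_assoc]
    · simp [meshSameInner, h, ih, List.append_assoc]

lemma meshSameStep_eq (res : List (List String)) (item : List String) :
    meshSameStep res item =
      if res.any (fun r => msKey r = msKey item) then
        res.map (fun r => if msKey r = msKey item then msUpd item r else r)
      else res ++ [item] := by
  unfold meshSameStep
  rw [meshSameInner_foldl]
  by_cases h : res.any (fun r => msKey r = msKey item)
  · simp [h]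
  · have hmap : res.map (fun r => if msKey r = msKey item then msUpd item r else r) = res := by
      conv_rhs => rw [← List.map_id res]
      apply List.map_congr_left
      intro r hr
      simp only [List.any_eq_true] at h
      exact if_neg fun hk => h ⟨r, hr, by simpa using hk⟩
    simp [h, hmap]

-- "&".join of a nonempty list extends on the right by "&" ++ x
lemma chars_join_append (sep x : List Char) (l : List (List Char)) (h : l ≠ []) :
    PySem.Chars.join sep (l ++ [x]) = PySem.Chars.join sep l ++ sep ++ x := by
  induction l with
  | nil => exact absurd rfl h
  | cons p t ih =>
    cases t with
    | nil => simp [PySem.Chars.join_singleton, PySem.Chars.join_cons_cons]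
    | cons q r =>
      simp only [List.cons_append] at ih ⊢
      rw [PySem.Chars.join_cons_cons, ih (by simp), PySem.Chars.join_cons_cons]
      simp [List.append_assoc]

lemma str_join_append (l : List String) (x : String) (h : l ≠ []) :
    PySem.Str.join "&" (l ++ [x]) = PySem.Str.join "&" l ++ "&" ++ x := by
  have inj : ∀ s t : String, s.toList = t.toList → s = t := by
    intro s t hst
    rw [← String.ofList_toList (s := s), hst, String.ofList_toList]
  apply inj
  simp only [PySem.Str.toList_join, String.toList_append, List.map_append, List.map_singleton]
  rw [chars_join_append _ _ _ (by simpa using h)]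

-- a well-formed group entry: nonempty, all members share the key and have ≥ 2 fields
def msGood (p : String × List (List String)) : Prop :=
  p.2 ≠ [] ∧ ∀ it ∈ p.2, msKey it = p.1 ∧ 2 ≤ it.length

-- the merged row of a good entry carries the entry's key at position 1
lemma msKey_row (k : String) (items : List (List String)) (hne : items ≠ [])
    (hall : ∀ it ∈ items, msKey it = k ∧ 2 ≤ it.length) :
    msKey (meshSame_altRow items) = k := by
  obtain ⟨first, rest, hfr⟩ := List.exists_cons_of_ne_nil hne
  subst hfr
  have h1 := hall first List.mem_cons_self
  obtain ⟨a, b, t, hform⟩ : ∃ a b t, first = a :: b :: t := by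
    cases first with
    | nil => exact absurd h1.2 (by simp)
    | cons a u =>
      cases u with
      | nil => exact absurd h1.2 (by simp)
      | cons b t => exact ⟨a, b, t, rfl⟩
  subst hform
  have := h1.1
  simp only [msKey, meshSame_altRow] at this ⊢
  rw [PySem.List.slice_from _ (by norm_num)]
  simpa [PySem.List.pyGetD, PySem.List.pyIdx?, PySem.List.pyGet?] using this

-- a singleton group merges back to its only item
lemma row_singleton (item : List String) (h : 2 ≤ item.length) :
    meshSame_altRow [item] = item := by
  obtain ⟨a, u, hform⟩ := List.exists_cons_of_ne_nil (by intro hn; simp [hn] at h : item ≠ [])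
  subst hform
  simp only [meshSame_altRow, List.map_cons, List.map_nil]
  rw [PySem.List.slice_from _ (by norm_num)]
  simp [PySem.Str.join, PySem.Chars.join_singleton, PySem.List.pyGetD, PySem.List.pyIdx?,
    PySem.List.pyGet?]

lemma pyGetD_cons_zero {α : Type} (x : α) (xs : List α) (d : α) :
    PySem.List.pyGetD (x :: xs) 0 d = x := by
  simp [PySem.List.pyGetD, PySem.List.pyIdx?, PySem.List.pyGet?]

-- appending a matching item = A's in-place update of the merged row
lemma row_append (items : List (List String)) (item : List String)
    (hne : items ≠ []) (hfirst : ∀ it ∈ items, 2 ≤ it.length) :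
    meshSame_altRow (items ++ [item]) = msUpd item (meshSame_altRow items) := by
  obtain ⟨first, rest, hfr⟩ := List.exists_cons_of_ne_nil hne
  subst hfr
  simp only [meshSame_altRow, msUpd, List.map_append, List.map_cons, List.map_nil]
  rw [str_join_append _ _ (by simp)]
  simp only [List.cons_append, pyGetD_cons_zero]
  simp [PySem.List.pyGetD, PySem.List.pyIdx?, PySem.List.pyGet?]

-- main invariant: A's running result is the merged image of B's group dict
lemma meshSame_invariant (l : List (List String)) (hl : ∀ x ∈ l, 2 ≤ x.length) :
    ∀ d : PySem.Dict String (List (List String)),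
      d.keys.Nodup →
      (∀ p ∈ d.items, msGood p) →
      l.foldl meshSameStep (d.items.map (fun p => meshSame_altRow p.2))
        = ((l.foldl meshSame_altGroup d).items).map (fun p => meshSame_altRow p.2) := by
  induction l with
  | nil => intro d _ _; rfl
  | cons item t ih =>
    intro d hnd hgood
    have hitem : 2 ≤ item.length := hl item List.mem_cons_self
    have ht : ∀ x ∈ t, 2 ≤ x.length := fun x hx => hl x (List.mem_cons_of_mem _ hx)
    have hkeys : d.keys = d.items.map (fun p => p.1) := rfl
    rw [List.foldl_cons, List.foldl_cons, meshSameStep_eq]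
    have hany : (d.items.map (fun p => meshSame_altRow p.2)).any
        (fun r => msKey r = msKey item) = true ↔ msKey item ∈ d.keys := by
      constructor
      · intro h
        obtain ⟨r, hr, hkr⟩ := List.any_eq_true.mp h
        obtain ⟨p, hp, hpr⟩ := List.mem_map.mp hr
        have : p.1 = msKey item := by
          rw [← msKey_row p.1 p.2 (hgood p hp).1 (hgood p hp).2, hpr]
          exact of_decide_eq_true hkr
        rw [hkeys]
        exact List.mem_map.mpr ⟨p, hp, this⟩
      · intro h
        rw [hkeys] at h
        obtain ⟨p, hp, hpk⟩ := List.mem_map.mp h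
        exact List.any_eq_true.mpr ⟨meshSame_altRow p.2, List.mem_map_of_mem hp,
          by rw [msKey_row p.1 p.2 (hgood p hp).1 (hgood p hp).2, hpk]; simp⟩
    by_cases hmem : msKey item ∈ d.keys
    · -- existing key: both sides update the entry in place
      rw [if_pos (hany.mpr hmem)]
      obtain ⟨p0, hp0, hp0k⟩ := List.mem_map.mp (hkeys ▸ hmem)
      have hget : d.get? (msKey item) = some p0.2 :=
        PySem.Dict.get?_of_mem_items d (by rw [← hp0k]; exact hp0) hnd
      have hcont : d.contains (msKey item) = true := by
        rw [PySem.Dict.contains_eq_isSome_get?, hget]; rfl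
      have hstep : meshSame_altGroup d item = d.insert (msKey item) (p0.2 ++ [item]) := by
        unfold meshSame_altGroup PySem.Dict.modify
        rw [show PySem.List.pyGetD item 1 "" = msKey item from rfl,
          PySem.Dict.getD_of_get?_eq_some d [] hget]
      rw [hstep]
      have hinj := List.inj_on_of_nodup_map (hkeys ▸ hnd : (d.items.map (fun p => p.1)).Nodup)
      have hmap : (d.items.map (fun p => meshSame_altRow p.2)).map
            (fun r => if msKey r = msKey item then msUpd item r else r)
          = ((d.insert (msKey item) (p0.2 ++ [item])).items).map (fun p => meshSame_altRow p.2) := by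
        rw [PySem.Dict.items_insert_of_contains d _ hcont, List.map_map, List.map_map]
        apply List.map_congr_left
        intro p hp
        by_cases hk : p.1 = msKey item
        · have hpp0 : p = p0 := hinj hp hp0 (by rw [hk, hp0k])
          have hrow : msKey (meshSame_altRow p.2) = msKey item := by
            rw [msKey_row p.1 p.2 (hgood p hp).1 (hgood p hp).2, hk]
          simp only [Function.comp_def, hrow, if_pos, (by simp [hk] : (p.1 == msKey item) = true)]
          rw [hpp0, row_append p0.2 item (hgood p0 hp0).1
            (fun it hit => ((hgood p0 hp0).2 it hit).2)]
        · have hrow : msKey (meshSame_altRow p.2) ≠ msKey item := by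
            rw [msKey_row p.1 p.2 (hgood p hp).1 (hgood p hp).2]; exact hk
          simp [hrow, hk]
      rw [hmap]
      apply ih ht
      · rw [PySem.Dict.keys_insert_of_contains d _ hcont]; exact hnd
      · intro p hp
        rw [PySem.Dict.items_insert_of_contains d _ hcont] at hp
        obtain ⟨q, hq, hqp⟩ := List.mem_map.mp hp
        by_cases hk : q.1 = msKey item
        · have hqq0 : q = p0 := hinj hq hp0 (by rw [hk, hp0k])
          rw [← hqp, if_pos (by simp [hk])]
          refine ⟨by simp, ?_⟩
          intro it hit
          rcases List.mem_append.mp hit with h | h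
          · have := (hgood p0 (hqq0 ▸ hq)).2 it h
            exact ⟨by rw [this.1, ← hqq0, hk], this.2⟩
          · rw [List.mem_singleton.mp h]; exact ⟨rfl, hitem⟩
        · rw [← hqp, if_neg (by simp [hk])]
          exact hgood q hq
    · -- fresh key: both sides append
      rw [if_neg (fun h => hmem (hany.mp h))]
      have hcont : d.contains (msKey item) = false := by
        rw [← Bool.not_eq_true, PySem.Dict.contains_iff_mem_keys]; exact hmem
      have hstep : meshSame_altGroup d item = d.insert (msKey item) [item] := by
        unfold meshSame_altGroup PySem.Dict.modify
        rw [show PySem.List.pyGetD item 1 "" = msKey item from rfl,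
          PySem.Dict.getD_of_not_contains d [] hcont]
        simp
      rw [hstep]
      have hmap : d.items.map (fun p => meshSame_altRow p.2) ++ [item]
          = ((d.insert (msKey item) [item]).items).map (fun p => meshSame_altRow p.2) := by
        rw [PySem.Dict.items_insert_of_not_contains d _ hcont, List.map_append]
        simp [row_singleton item hitem]
      rw [hmap]
      apply ih ht
      · rw [PySem.Dict.keys_insert_of_not_contains d _ hcont]
        exact List.Nodup.append hnd (List.nodup_singleton _)
          (by intro a ha hb; rw [List.mem_singleton.mp hb] at ha; exact hmem ha)
      · intro p hp
        rw [PySem.Dict.items_insert_of_not_contains d _ hcont] at hp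
        rcases List.mem_append.mp hp with h | h
        · exact hgood p h
        · rw [List.mem_singleton.mp h]
          exact ⟨by simp, fun it hit => by rw [List.mem_singleton.mp hit]; exact ⟨rfl, hitem⟩⟩

-- ===== VERDICT (by name: the statement is the Claim_ definition above) =====
theorem meshSame_spec : Claim_equal_meshSame := by
  intro allList _ hpre
  unfold Spec_meshSame meshSame meshSame_alt
  rw [PySem.Dict.values, List.map_map]
  exact meshSame_invariant allList hpre PySem.Dict.empty (by simp) (by simp [PySem.Dict.empty])
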